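-- pv_equiv track=rewrite | github.com/VaHiX/CodeForces | Python/ByTier/D/1804_D_Accommodation.py | solve
-- ===== SOURCE A (Python) =====
-- def solve(N, M, grid):
--     mn = mx = 0
--     for row in grid:
--         tot = row.count("1")  # Total number of bright windows in this floor
--
--         # Calculate minimum occupied apartments:
--         # Try to form as many two-bedroom apartments as possible
--         two = i = 0
--         while i < M:
--             if i + 1 < M and row[i] == row[i + 1] == "1":
--                 two += 1
--                 i += 2  # Skip next window since it's part of a two-bedroom
--             else:
--                 i += 1
--         # Min occupied = total bright windows minus those we must use as pairs
--         # At most M//4 two-bedroom apartments are allowed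
--         mn += tot - min(two, M // 4)
--
--         # Calculate maximum occupied apartments:
--         # Try to leave as many windows as possible to be single ones
--         two = i = 0
--         while i < M:
--             # If either window in pair is dark, we can form a two-bedroom
--             # (i.e., we don't count this pair towards single windows)
--             if i + 1 < M and (row[i] == "0" or row[i + 1] == "0"):
--                 two += 1
--                 i += 2
--             else:
--                 i += 1
--         # Max occupied = total bright windows minus pairs that could be formed
--         # So if we have 0 pairs, all are used as singles; if we have M//4 pairs,
--         # then we minimize singles, maximizing total occupied
--         mx += tot - (M // 4 - min(two, M // 4))
--
--     return mn, mx
-- ===== SOURCE B (Python) =====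
-- def solve(N, M, grid):
--     cap = M // 4
--     mn = mx = 0
--     for row in grid:
--         tot = row.count("1")
--         # single pass: carry the pending window instead of index-skipping
--         pmin = False   # previous window is an unpaired bright one
--         pmax = None    # previous window, still unpaired (any colour)
--         a = b = 0
--         for c in row[:M]:
--             if pmin and c == "1":
--                 a += 1
--                 pmin = False
--             else:
--                 pmin = c == "1"
--             if pmax is not None and (pmax == "0" or c == "0"):
--                 b += 1
--                 pmax = None
--             else:
--                 pmax = c
--         mn += tot - min(a, cap)
--         mx += tot - (cap - min(b, cap))
--     return mn, mx
-- ===== Notes on version B (the rewrite author's own statement) =====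
-- stated objective: alternative
-- what changed: Both index-skipping greedy while-loops over window positions are replaced by one structural left-to-right pass over the row's characters that carries a pending-window state (an unpaired bright window for the min count, the last unpaired window for the max count), computing both pair counts in a single fold with no index arithmetic.
import Mathlib
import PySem

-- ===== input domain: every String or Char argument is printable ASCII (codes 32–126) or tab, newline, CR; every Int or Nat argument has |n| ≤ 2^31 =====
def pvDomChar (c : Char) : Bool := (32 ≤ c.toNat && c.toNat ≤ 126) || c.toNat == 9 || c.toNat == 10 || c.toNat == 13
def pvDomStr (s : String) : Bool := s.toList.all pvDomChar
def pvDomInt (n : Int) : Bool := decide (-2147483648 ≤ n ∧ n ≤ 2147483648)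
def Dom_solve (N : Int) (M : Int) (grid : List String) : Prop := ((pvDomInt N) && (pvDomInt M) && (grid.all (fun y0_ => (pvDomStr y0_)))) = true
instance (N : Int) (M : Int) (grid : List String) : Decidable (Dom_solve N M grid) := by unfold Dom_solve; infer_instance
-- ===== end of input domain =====

-- B replaces A's two index-skipping greedy while-loops by one structural pass over the
-- row's characters carrying a pending-window state (objective: alternative decomposition).

-- ===== PORT A =====
-- while i < M: if i+1 < M and row[i] == row[i+1] == "1": two += 1; i += 2 else: i += 1
def pvMinLoopA (row : String) (M : Int) (two i : Int) : Int :=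
  if _h : i < M then
    if i + 1 < M ∧ PySem.Str.pyGet? row i = PySem.Str.pyGet? row (i + 1)
        ∧ PySem.Str.pyGet? row (i + 1) = some '1' then
      pvMinLoopA row M (two + 1) (i + 2)
    else
      pvMinLoopA row M two (i + 1)
  else two
termination_by (M - i).toNat
decreasing_by all_goals omega

-- while i < M: if i+1 < M and (row[i] == "0" or row[i+1] == "0"): two += 1; i += 2 else: i += 1
def pvMaxLoopA (row : String) (M : Int) (two i : Int) : Int :=
  if _h : i < M then
    if i + 1 < M ∧ (PySem.Str.pyGet? row i = some '0' ∨ PySem.Str.pyGet? row (i + 1) = some '0') then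
      pvMaxLoopA row M (two + 1) (i + 2)
    else
      pvMaxLoopA row M two (i + 1)
  else two
termination_by (M - i).toNat
decreasing_by all_goals omega

def solve (N : Int) (M : Int) (grid : List String) : Int × Int :=
  grid.foldl (fun acc row =>
    let tot : Int := (PySem.Str.count row "1" : Int)
    let twoMin := pvMinLoopA row M 0 0
    let twoMax := pvMaxLoopA row M 0 0
    (acc.1 + (tot - min twoMin (PySem.Int.floordiv M 4)),
     acc.2 + (tot - (PySem.Int.floordiv M 4 - min twoMax (PySem.Int.floordiv M 4)))))
    (0, 0)

-- ===== PORT B =====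
-- one fold step over a character: state = (pmin, pmax, a, b)
def pvStepB (st : Bool × Option Char × Int × Int) (c : Char) : Bool × Option Char × Int × Int :=
  let pa := if st.1 ∧ c = '1' then (false, st.2.2.1 + 1) else (decide (c = '1'), st.2.2.1)
  let qb := match st.2.1 with
    | some p => if p = '0' ∨ c = '0' then ((none : Option Char), st.2.2.2 + 1) else (some c, st.2.2.2)
    | none => (some c, st.2.2.2)
  (pa.1, qb.1, pa.2, qb.2)

def solve_alt (N : Int) (M : Int) (grid : List String) : Int × Int :=
  let cap := PySem.Int.floordiv M 4
  grid.foldl (fun acc row =>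
    let tot : Int := (PySem.Str.count row "1" : Int)
    let st := (PySem.Str.slice row none (some M)).toList.foldl pvStepB (false, none, 0, 0)
    (acc.1 + (tot - min st.2.2.1 cap),
     acc.2 + (tot - (cap - min st.2.2.2 cap))))
    (0, 0)

-- ===== PRECONDITION & SPEC =====
-- Pre excludes exactly the inputs on which A raises IndexError: M ≥ 2 together with a row
-- shorter than M windows (A then indexes past the row's end).
def Pre_solve (N : Int) (M : Int) (grid : List String) : Prop :=
  ∀ row ∈ grid, M ≤ 1 ∨ M ≤ (row.toList.length : Int)
instance (N : Int) (M : Int) (grid : List String) : Decidable (Pre_solve N M grid) := by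
  unfold Pre_solve; infer_instance

def pvWitness_solve : Int × Int × List String := (2, 4, ["1100", "0110"])

def Spec_solve (N : Int) (M : Int) (grid : List String) (out : Int × Int) : Prop := out = solve_alt N M grid
instance (N : Int) (M : Int) (grid : List String) (out : Int × Int) : Decidable (Spec_solve N M grid out) := by unfold Spec_solve; infer_instance

-- ===== CLAIM (what is proved, stated in full; the proofs are below) =====
def Claim_equal_solve : Prop := ∀ (N : Int) (M : Int) (grid : List String), Dom_solve N M grid → Pre_solve N M grid → Spec_solve N M grid (solve N M grid)

-- ===== LEMMAS AND PROOFS =====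

-- projections of the combined fold: the min-pass accumulator
def pvF : List Char → Bool → Int → Int
  | [], _, a => a
  | c :: cs, p, a => if p ∧ c = '1' then pvF cs false (a + 1) else pvF cs (c = '1') a

-- the max-pass accumulator
def pvG : List Char → Option Char → Int → Int
  | [], _, b => b
  | c :: cs, some p, b => if p = '0' ∨ c = '0' then pvG cs none (b + 1) else pvG cs (some c) b
  | c :: cs, none, b => pvG cs (some c) b

theorem pvFoldB_fst (cs : List Char) : ∀ (p : Bool) (q : Option Char) (a b : Int),
    (cs.foldl pvStepB (p, q, a, b)).2.2.1 = pvF cs p a := by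
  induction cs with
  | nil => intro p q a b; simp [pvF]
  | cons c cs ih =>
    intro p q a b
    simp only [List.foldl_cons]
    by_cases hp : p ∧ c = '1'
    · obtain ⟨hp1, hp2⟩ := hp
      cases q with
      | none => simp [pvStepB, pvF, hp1, hp2, ih]
      | some x => by_cases hx : x = '0' ∨ c = '0' <;> simp [pvStepB, pvF, hp1, hp2, ih]
    · have hF : pvF (c :: cs) p a = pvF cs (c = '1') a := by
        simp only [pvF]; rw [if_neg (by simpa using hp)]
      rw [hF]
      cases q with
      | none =>
        simp only [pvStepB]
        rw [if_neg (by simpa using hp)]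
        simp [ih]
      | some x =>
        by_cases hx : x = '0' ∨ c = '0' <;>
          · simp only [pvStepB]
            rw [if_neg (by simpa using hp)]
            simp [hx, ih]

theorem pvFoldB_snd (cs : List Char) : ∀ (p : Bool) (q : Option Char) (a b : Int),
    (cs.foldl pvStepB (p, q, a, b)).2.2.2 = pvG cs q b := by
  induction cs with
  | nil => intro p q a b; simp [pvG]
  | cons c cs ih =>
    intro p q a b
    simp only [List.foldl_cons]
    by_cases hp : p ∧ c = '1' <;>
    · cases q with
      | none =>
        simp only [pvStepB, pvG]
        first
          | (rw [if_pos (by simpa using hp)]; simp [ih])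
          | (rw [if_neg (by simpa using hp)]; simp [ih])
      | some x =>
        by_cases hx : x = '0' ∨ c = '0' <;>
          · simp only [pvStepB]
            first
              | rw [if_pos (by simpa using hp)]
              | rw [if_neg (by simpa using hp)]
            simp [pvG, hx, ih]

-- accumulators never decrease
theorem pvMinLoopA_ge (row : String) (M : Int) :
    ∀ (k : Nat) (two i : Int), (M - i).toNat ≤ k → two ≤ pvMinLoopA row M two i := by
  intro k
  induction k with
  | zero => intro two i hk; rw [pvMinLoopA, dif_neg (by omega)]
  | succ k ih =>
    intro two i hk
    by_cases h : i < M
    · rw [pvMinLoopA, dif_pos h]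
      split
      · exact le_trans (by omega) (ih (two + 1) (i + 2) (by omega))
      · exact ih two (i + 1) (by omega)
    · rw [pvMinLoopA, dif_neg h]

theorem pvMaxLoopA_ge (row : String) (M : Int) :
    ∀ (k : Nat) (two i : Int), (M - i).toNat ≤ k → two ≤ pvMaxLoopA row M two i := by
  intro k
  induction k with
  | zero => intro two i hk; rw [pvMaxLoopA, dif_neg (by omega)]
  | succ k ih =>
    intro two i hk
    by_cases h : i < M
    · rw [pvMaxLoopA, dif_pos h]
      split
      · exact le_trans (by omega) (ih (two + 1) (i + 2) (by omega))
      · exact ih two (i + 1) (by omega)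
    · rw [pvMaxLoopA, dif_neg h]

-- the core correspondence lemmas: greedy loop = structural fold, on rows long enough
theorem pvMinLoop_eq_F (row : String) (M : Int) (hM : 0 ≤ M) (hlen : M.toNat ≤ row.toList.length) :
    ∀ (k : Nat) (i a : Int), 0 ≤ i → i ≤ M → (M - i).toNat ≤ k →
      pvMinLoopA row M a i = pvF ((row.toList.take M.toNat).drop i.toNat) false a := by
  have hslen : (row.toList.take M.toNat).length = M.toNat := by
    rw [List.length_take]; omega
  intro k
  induction k with
  | zero =>
    intro i a h0 h1 hk
    have hiM : i = M := by omega
    rw [pvMinLoopA, dif_neg (by omega)]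
    rw [List.drop_eq_nil_of_le (by omega)]
    simp [pvF]
  | succ k ih =>
    intro i a h0 h1 hk
    by_cases hiM : i < M
    · have hi' : i.toNat < (row.toList.take M.toNat).length := by omega
      have hgi : PySem.Str.pyGet? row i = some (row.toList[i.toNat]'(by omega)) := by
        have := PySem.List.pyGet?_eq_some_getElem row.toList h0 (by omega)
        simpa using this
      have hd1 : (row.toList.take M.toNat).drop i.toNat
          = (row.toList[i.toNat]'(by omega)) :: (row.toList.take M.toNat).drop (i.toNat + 1) := by
        rw [List.drop_eq_getElem_cons hi', List.getElem_take]
      by_cases hpair : i + 1 < M ∧ PySem.Str.pyGet? row i = PySem.Str.pyGet? row (i + 1)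
          ∧ PySem.Str.pyGet? row (i + 1) = some '1'
      · obtain ⟨h2, he, hone⟩ := hpair
        have hi1' : i.toNat + 1 < (row.toList.take M.toNat).length := by omega
        have hgi1 : PySem.Str.pyGet? row (i + 1) = some (row.toList[i.toNat + 1]'(by omega)) := by
          have := PySem.List.pyGet?_eq_some_getElem row.toList (i := i + 1) (by omega) (by omega)
          have ht : (i + 1).toNat = i.toNat + 1 := by omega
          simpa [ht] using this
        have hc1 : row.toList[i.toNat]'(by omega) = '1' := by
          have := he.trans hone; rw [hgi] at this; exact Option.some.inj this
        have hc2 : row.toList[i.toNat + 1]'(by omega) = '1' := by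
          rw [hgi1] at hone; exact Option.some.inj hone
        rw [pvMinLoopA, dif_pos hiM, if_pos ⟨h2, he, hone⟩]
        rw [ih (i + 2) (a + 1) (by omega) (by omega) (by omega)]
        rw [hd1, List.drop_eq_getElem_cons hi1']
        have ht2 : (i + 2).toNat = i.toNat + 1 + 1 := by omega
        simp [pvF, hc1, hc2, ht2]
      · rw [pvMinLoopA, dif_pos hiM, if_neg hpair]
        rw [ih (i + 1) a (by omega) (by omega) (by omega)]
        have ht1 : (i + 1).toNat = i.toNat + 1 := by omega
        by_cases hM1 : i + 1 < M
        · have hi1' : i.toNat + 1 < (row.toList.take M.toNat).length := by omega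
          have hgi1 : PySem.Str.pyGet? row (i + 1) = some (row.toList[i.toNat + 1]'(by omega)) := by
            have := PySem.List.pyGet?_eq_some_getElem row.toList (i := i + 1) (by omega) (by omega)
            simpa [ht1] using this
          have hd2 : (row.toList.take M.toNat).drop (i.toNat + 1)
              = (row.toList[i.toNat + 1]'(by omega)) :: (row.toList.take M.toNat).drop (i.toNat + 1 + 1) := by
            rw [List.drop_eq_getElem_cons hi1', List.getElem_take]
          have hnot : ¬(row.toList[i.toNat]'(by omega) = '1'
              ∧ row.toList[i.toNat + 1]'(by omega) = '1') := by
            intro ⟨hc1, hc2⟩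
            exact hpair ⟨hM1, by rw [hgi, hgi1, hc1, hc2], by rw [hgi1, hc2]⟩
          rw [ht1, hd1]
          by_cases hc1 : row.toList[i.toNat]'(by omega) = '1'
          · have hc2 : ¬ row.toList[i.toNat + 1]'(by omega) = '1' := fun h => hnot ⟨hc1, h⟩
            rw [hd2]
            simp [pvF, hc1, hc2]
          · simp [pvF, hc1]
        · have hi1M : i + 1 = M := by omega
          have hnil : (row.toList.take M.toNat).drop (i.toNat + 1) = [] :=
            List.drop_eq_nil_of_le (by omega)
          rw [ht1, hnil, hd1, hnil]
          simp [pvF]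
    · have hiM' : i = M := by omega
      rw [pvMinLoopA, dif_neg hiM]
      rw [List.drop_eq_nil_of_le (by omega)]
      simp [pvF]

theorem pvMaxLoop_eq_G (row : String) (M : Int) (hM : 0 ≤ M) (hlen : M.toNat ≤ row.toList.length) :
    ∀ (k : Nat) (i b : Int), 0 ≤ i → i ≤ M → (M - i).toNat ≤ k →
      pvMaxLoopA row M b i = pvG ((row.toList.take M.toNat).drop i.toNat) none b := by
  have hslen : (row.toList.take M.toNat).length = M.toNat := by
    rw [List.length_take]; omega
  intro k
  induction k with
  | zero =>
    intro i b h0 h1 hk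
    rw [pvMaxLoopA, dif_neg (by omega)]
    rw [List.drop_eq_nil_of_le (by omega)]
    simp [pvG]
  | succ k ih =>
    intro i b h0 h1 hk
    by_cases hiM : i < M
    · have hi' : i.toNat < (row.toList.take M.toNat).length := by omega
      have hgi : PySem.Str.pyGet? row i = some (row.toList[i.toNat]'(by omega)) := by
        have := PySem.List.pyGet?_eq_some_getElem row.toList h0 (by omega)
        simpa using this
      have hd1 : (row.toList.take M.toNat).drop i.toNat
          = (row.toList[i.toNat]'(by omega)) :: (row.toList.take M.toNat).drop (i.toNat + 1) := by
        rw [List.drop_eq_getElem_cons hi', List.getElem_take]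
      by_cases hpair : i + 1 < M ∧ (PySem.Str.pyGet? row i = some '0'
          ∨ PySem.Str.pyGet? row (i + 1) = some '0')
      · obtain ⟨h2, hz⟩ := hpair
        have hi1' : i.toNat + 1 < (row.toList.take M.toNat).length := by omega
        have hgi1 : PySem.Str.pyGet? row (i + 1) = some (row.toList[i.toNat + 1]'(by omega)) := by
          have := PySem.List.pyGet?_eq_some_getElem row.toList (i := i + 1) (by omega) (by omega)
          have ht : (i + 1).toNat = i.toNat + 1 := by omega
          simpa [ht] using this
        have hz' : row.toList[i.toNat]'(by omega) = '0'
            ∨ row.toList[i.toNat + 1]'(by omega) = '0' := by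
          rcases hz with h | h
          · left; rw [hgi] at h; exact Option.some.inj h
          · right; rw [hgi1] at h; exact Option.some.inj h
        rw [pvMaxLoopA, dif_pos hiM, if_pos ⟨h2, hz⟩]
        rw [ih (i + 2) (b + 1) (by omega) (by omega) (by omega)]
        rw [hd1, List.drop_eq_getElem_cons hi1', List.getElem_take]
        have ht2 : (i + 2).toNat = i.toNat + 1 + 1 := by omega
        simp only [pvG]
        rw [if_pos hz', ht2]
      · rw [pvMaxLoopA, dif_pos hiM, if_neg hpair]
        rw [ih (i + 1) b (by omega) (by omega) (by omega)]
        have ht1 : (i + 1).toNat = i.toNat + 1 := by omega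
        by_cases hM1 : i + 1 < M
        · have hi1' : i.toNat + 1 < (row.toList.take M.toNat).length := by omega
          have hgi1 : PySem.Str.pyGet? row (i + 1) = some (row.toList[i.toNat + 1]'(by omega)) := by
            have := PySem.List.pyGet?_eq_some_getElem row.toList (i := i + 1) (by omega) (by omega)
            simpa [ht1] using this
          have hd2 : (row.toList.take M.toNat).drop (i.toNat + 1)
              = (row.toList[i.toNat + 1]'(by omega)) :: (row.toList.take M.toNat).drop (i.toNat + 1 + 1) := by
            rw [List.drop_eq_getElem_cons hi1', List.getElem_take]
          have hnot : ¬(row.toList[i.toNat]'(by omega) = '0'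
              ∨ row.toList[i.toNat + 1]'(by omega) = '0') := by
            intro h
            refine hpair ⟨hM1, ?_⟩
            rcases h with h | h
            · left; rw [hgi, h]
            · right; rw [hgi1, h]
          rw [ht1, hd1, hd2]
          simp only [pvG]
          rw [if_neg hnot]
        · have hnil : (row.toList.take M.toNat).drop (i.toNat + 1) = [] :=
            List.drop_eq_nil_of_le (by omega)
          rw [ht1, hnil, hd1, hnil]
          simp [pvG]
    · rw [pvMaxLoopA, dif_neg hiM]
      rw [List.drop_eq_nil_of_le (by omega)]
      simp [pvG]

theorem pvF_ge (cs : List Char) : ∀ (p : Bool) (a : Int), a ≤ pvF cs p a := by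
  induction cs with
  | nil => intro p a; simp [pvF]
  | cons c cs ih =>
    intro p a
    by_cases h : p ∧ c = '1'
    · simp only [pvF]; rw [if_pos (by simpa using h)]; exact le_trans (by omega) (ih false (a + 1))
    · simp only [pvF]; rw [if_neg (by simpa using h)]; exact ih _ a

theorem pvG_ge (cs : List Char) : ∀ (q : Option Char) (b : Int), b ≤ pvG cs q b := by
  induction cs with
  | nil => intro q b; simp [pvG]
  | cons c cs ih =>
    intro q b
    cases q with
    | none => simpa [pvG] using ih (some c) b
    | some x =>
      by_cases h : x = '0' ∨ c = '0'
      · simp only [pvG]; rw [if_pos h]; exact le_trans (by omega) (ih none (b + 1))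
      · simp only [pvG]; rw [if_neg h]; exact ih _ b

-- per-row agreement of the two contribution functions
theorem pvRow_eq (M : Int) (row : String) (hrow : M ≤ 1 ∨ M ≤ (row.toList.length : Int)) :
    (min (pvMinLoopA row M 0 0) (PySem.Int.floordiv M 4)
      = min ((PySem.Str.slice row none (some M)).toList.foldl pvStepB (false, none, 0, 0)).2.2.1
          (PySem.Int.floordiv M 4))
    ∧ (min (pvMaxLoopA row M 0 0) (PySem.Int.floordiv M 4)
      = min ((PySem.Str.slice row none (some M)).toList.foldl pvStepB (false, none, 0, 0)).2.2.2
          (PySem.Int.floordiv M 4)) := by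
  have hf := pvFoldB_fst (PySem.Str.slice row none (some M)).toList false none 0 0
  have hg := pvFoldB_snd (PySem.Str.slice row none (some M)).toList false none 0 0
  by_cases hc : 0 ≤ M ∧ M ≤ (row.toList.length : Int)
  · have hsl : (PySem.Str.slice row none (some M)).toList = row.toList.take M.toNat := by
      simp [PySem.List.slice_to _ hc.1]
    have hmin := pvMinLoop_eq_F row M hc.1 (by omega) M.toNat 0 0 le_rfl hc.1 (by omega)
    have hmax := pvMaxLoop_eq_G row M hc.1 (by omega) M.toNat 0 0 le_rfl hc.1 (by omega)
    simp only [Int.toNat_zero, List.drop_zero] at hmin hmax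
    rw [hf, hg, hsl, hmin, hmax]
    exact ⟨rfl, rfl⟩
  · have hcap : PySem.Int.floordiv M 4 ≤ 0 := by
      rw [PySem.Int.floordiv_eq_ediv_of_pos (by norm_num)]
      have hM1 : M ≤ 1 := by
        rcases hrow with h | h
        · exact h
        · rcases lt_or_ge M 0 with h' | h'
          · omega
          · exact absurd ⟨h', h⟩ hc
      omega
    have h1 := pvMinLoopA_ge row M M.toNat 0 0 (by omega)
    have h2 := pvMaxLoopA_ge row M M.toNat 0 0 (by omega)
    have h3 := pvF_ge (PySem.Str.slice row none (some M)).toList false 0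
    have h4 := pvG_ge (PySem.Str.slice row none (some M)).toList none 0
    rw [hf, hg]
    constructor <;> rw [min_eq_right (by omega), min_eq_right (by omega)]

-- ===== VERDICT (by name: the statement is the Claim_ definition above) =====
theorem solve_spec : Claim_equal_solve := by
  intro N M grid hdom hpre
  unfold Spec_solve solve solve_alt
  apply PySem.List.foldl_congr_mem
  intro acc row hrow
  obtain ⟨h1, h2⟩ := pvRow_eq M row (hpre row hrow)
  dsimp only
  rw [h1, h2]
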